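-- pv_equiv track=rewrite | github.com/ahatzikonstantinou/ehome_v3.0 | RFLink.py | getMaxCommonSubstring
-- ===== SOURCE A (Python) =====
-- def getMaxCommonSubstring(lines):
--     if not lines:
--         return ""
--
--     # Find the shortest string in the list
--     shortest = min(lines, key=len)
--
--     # Function to find the longest common substring between two strings
--     def find_longest_common_substring(s1, s2):
--         matrix = [[0] * (len(s2) + 1) for _ in range(len(s1) + 1)]
--         max_length = 0
--         end_index = 0
--
--         for i in range(1, len(s1) + 1):
--             for j in range(1, len(s2) + 1):
--                 if s1[i - 1] == s2[j - 1]: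
--                     matrix[i][j] = matrix[i - 1][j - 1] + 1
--                     if matrix[i][j] > max_length:
--                         max_length = matrix[i][j]
--                         end_index = i
--                 else:
--                     matrix[i][j] = 0
--
--         return s1[end_index - max_length: end_index]
--
--     # Find the longest common substring among all pairs of lines
--     common_substring = shortest
--     for string in lines:
--         if string == shortest:
--             continue
--         common_substring = find_longest_common_substring(common_substring, string)
--
--     return common_substring
-- ===== SOURCE B (Python) =====
-- def getMaxCommonSubstring(lines):
--     if not lines:
--         return ""
--
--     shortest = min(lines, key=len)
--
--     # Longest common substring via binary search on the length ("is there a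
--     # common substring of length L?" is monotone in L), with a set of slices
--     # for the occurrence test; ties broken by the earliest start in s1, which
--     # is A's earliest-end rule.
--     def lcs(s1, s2):
--         def starts(L):
--             # earliest start i with s1[i:i+L] occurring in s2, else None (1 <= L <= min lengths)
--             subs = set()
--             for j in range(len(s2) - L + 1):
--                 subs.add(s2[j:j + L])
--             for i in range(len(s1) - L + 1):
--                 if s1[i:i + L] in subs:
--                     return i
--             return None
--
--         lo, best, hi = 0, 0, min(len(s1), len(s2))
--         while lo < hi:
--             mid = (lo + hi + 1) // 2
--             i = starts(mid)
--             if i is not None: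
--                 lo, best = mid, i
--             else:
--                 hi = mid - 1
--         return s1[best:best + lo]
--
--     common = shortest
--     for s in lines:
--         if s != shortest:
--             common = lcs(common, s)
--     return common
-- ===== Notes on version B (the rewrite author's own statement) =====
-- stated objective: alternative
-- what changed: The inner quadratic DP-matrix longest-common-substring pass is replaced by a binary search on the substring length (the existence of a common substring of length L is monotone in L) with a slice-set membership test, keeping the same earliest-end tie-break and the same outer reduce over the lines.
import Mathlib
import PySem

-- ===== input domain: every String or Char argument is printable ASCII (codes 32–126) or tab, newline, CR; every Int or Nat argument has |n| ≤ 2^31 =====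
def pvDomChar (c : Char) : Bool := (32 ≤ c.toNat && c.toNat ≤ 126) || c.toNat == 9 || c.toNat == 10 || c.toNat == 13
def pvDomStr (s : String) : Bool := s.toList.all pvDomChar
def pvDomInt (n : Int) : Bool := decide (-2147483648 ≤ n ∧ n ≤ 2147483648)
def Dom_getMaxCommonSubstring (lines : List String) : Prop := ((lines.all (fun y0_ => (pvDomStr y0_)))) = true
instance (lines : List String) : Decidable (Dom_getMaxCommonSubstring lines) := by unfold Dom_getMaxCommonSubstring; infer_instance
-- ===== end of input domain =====

-- B replaces A's quadratic DP-matrix inner LCS pass by a binary search on the substring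
-- length with a slice-set occurrence test (objective: alternative algorithm, same results).

-- ===== PORT A =====
-- inner 'for j' pass of find_longest_common_substring: walks s2 and the previous matrix
-- row in lockstep; cell value matrix[i][j] = prev[j-1]+1 / 0, updating (max_length, end_index)
-- exactly when the new cell exceeds the current max (same scan order as the Python).
def pvARow (c : Char) : List Char → List Nat → Nat → Nat → Nat → (List Nat × Nat × Nat)
  | [], _, _, m, e => ([], m, e)
  | _ :: _, [], _, m, e => ([], m, e)   -- unreachable: prev always has length |s2|+1
  | c2 :: s2, p :: prev, i, m, e =>
      let v := if c = c2 then p + 1 else 0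
      let r := pvARow c s2 prev i (if v > m then v else m) (if v > m then i else e)
      (v :: r.1, r.2)

-- outer 'for i' pass: row i is 0 :: cells, the next previous row
def pvARows (s2 : List Char) : List Char → List Nat → Nat → Nat → Nat → (Nat × Nat)
  | [], _, _, m, e => (m, e)
  | c :: s1, prev, i, m, e =>
      let r := pvARow c s2 prev i m e
      pvARows s2 s1 (0 :: r.1) (i + 1) r.2.1 r.2.2

-- find_longest_common_substring(s1, s2); matrix row 0 is [0]*(len(s2)+1).
-- s1[end_index - max_length : end_index]: always 0 ≤ e - m ≤ e (a length-m match ends at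
-- row e), so the Python slice is exactly drop/take.
def pvAFind (s1 s2 : List Char) : List Char :=
  let r := pvARows s2 s1 (List.replicate (s2.length + 1) 0) 1 0 0
  (s1.drop (r.2 - r.1)).take r.1

def getMaxCommonSubstring (lines : List String) : String :=
  match PySem.List.min? lines (fun s => PySem.Str.len s) with
  | none => ""        -- `if not lines: return ""` (min? is none exactly on the empty list)
  | some shortest =>  -- shortest = min(lines, key=len), first minimum, as in Python
      lines.foldl
        (fun common s =>
          if s = shortest then common
          else String.ofList (pvAFind common.toList s.toList))
        shortest

-- ===== PORT B =====
-- `for i in range(len(s1)-L+1): if s1[i:i+L] in subs: return i` — first hit, else none;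
-- called only with 1 ≤ L ≤ len(s1), so the range bound len(s1)-L+1 is the Nat value.
def pvBScan (s1 : List Char) (subs : PySem.Set (List Char)) (L : Nat) : List Nat → Option Nat
  | [] => none
  | i :: rest =>
      if PySem.Set.contains subs ((s1.drop i).take L) then some i
      else pvBScan s1 subs L rest

-- starts(L): earliest start of a common substring of length L, or none (1 ≤ L ≤ min lengths)
def pvBStarts (s1 s2 : List Char) (L : Nat) : Option Nat :=
  let subs := PySem.Set.ofList ((List.range (s2.length - L + 1)).map (fun j => (s2.drop j).take L))
  pvBScan s1 subs L (List.range (s1.length - L + 1))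

-- the `while lo < hi` binary search; (lo + hi + 1) // 2 on non-negative values is Nat division
def pvBLoop (s1 s2 : List Char) (lo best hi : Nat) : Nat × Nat :=
  if _h : lo < hi then
    let mid := (lo + hi + 1) / 2
    match pvBStarts s1 s2 mid with
    | some i => pvBLoop s1 s2 mid i hi
    | none => pvBLoop s1 s2 lo best (mid - 1)
  else (lo, best)
termination_by hi - lo
decreasing_by all_goals omega

-- lcs(s1, s2): returns s1[best:best+lo]
def pvBFind (s1 s2 : List Char) : List Char :=
  let r := pvBLoop s1 s2 0 0 (min s1.length s2.length)
  (s1.drop r.2).take r.1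

def getMaxCommonSubstring_alt (lines : List String) : String :=
  match PySem.List.min? lines (fun s => PySem.Str.len s) with
  | none => ""
  | some shortest =>
      lines.foldl
        (fun common s =>
          if s = shortest then common
          else String.ofList (pvBFind common.toList s.toList))
        shortest

-- ===== PRECONDITION & SPEC =====
def Spec_getMaxCommonSubstring (lines : List String) (out : String) : Prop := out = getMaxCommonSubstring_alt lines
instance (lines : List String) (out : String) : Decidable (Spec_getMaxCommonSubstring lines out) := by unfold Spec_getMaxCommonSubstring; infer_instance

-- ===== CLAIM (what is proved, stated in full; the proofs are below) =====
def Claim_equal_getMaxCommonSubstring : Prop := ∀ (lines : List String), Dom_getMaxCommonSubstring lines → Spec_getMaxCommonSubstring lines (getMaxCommonSubstring lines)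


-- ===== LEMMAS AND PROOFS =====

-- longest common prefix length of two char lists
def pvLcp : List Char → List Char → Nat
  | x :: xs, y :: ys => if x = y then pvLcp xs ys + 1 else 0
  | _, _ => 0

-- DP cell value: length of the longest common suffix of a[:i] and b[:j]
def pvP (a b : List Char) (i j : Nat) : Nat := pvLcp ((a.take i).reverse) ((b.take j).reverse)

def pvSub (a : List Char) (i L : Nat) : List Char := (a.drop i).take L

-- "a length-L common substring of a and b starts at i in a"
def pvMem (a b : List Char) (L i : Nat) : Prop :=
  i + L ≤ a.length ∧ ∃ j, j + L ≤ b.length ∧ pvSub a i L = pvSub b j L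

def pvCan (a b : List Char) (L : Nat) : Prop := ∃ i, pvMem a b L i

-- invariant of A's row loop after processing r rows: m is the max cell value so far,
-- e the earliest row where it is attained (0 while m = 0)
def pvInv (a b : List Char) (r m e : Nat) : Prop :=
  (∀ i j, i ≤ r → j ≤ b.length → pvP a b i j ≤ m) ∧
  ((m = 0 ∧ e = 0) ∨ (0 < m ∧ 0 < e ∧ e ≤ r ∧ (∃ j, j ≤ b.length ∧ pvP a b e j = m) ∧
    ∀ i j, i < e → j ≤ b.length → pvP a b i j < m))

def pvFoldUpd (vs : List Nat) (i m e : Nat) : Nat × Nat :=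
  vs.foldl (fun me v => if v > me.1 then (v, i) else me) (m, e)

theorem pvLcp_le_left (x y : List Char) : pvLcp x y ≤ x.length := by
  induction x generalizing y with
  | nil => simp [pvLcp]
  | cons a xs ih =>
      cases y with
      | nil => simp [pvLcp]
      | cons b ys =>
          simp only [pvLcp, List.length_cons]
          split_ifs
          · have := ih ys; omega
          · omega

theorem pvLcp_le_right (x y : List Char) : pvLcp x y ≤ y.length := by
  induction x generalizing y with
  | nil => simp [pvLcp]
  | cons a xs ih =>
      cases y with
      | nil => simp [pvLcp]
      | cons b ys =>
          simp only [pvLcp, List.length_cons]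
          split_ifs
          · have := ih ys; omega
          · omega

theorem pvLcp_ge_iff (L : Nat) (x y : List Char) :
    L ≤ pvLcp x y ↔ x.take L = y.take L ∧ L ≤ x.length ∧ L ≤ y.length := by
  induction L generalizing x y with
  | zero => simp
  | succ L ih =>
      cases x with
      | nil => simp [pvLcp]
      | cons a xs =>
          cases y with
          | nil => simp [pvLcp]
          | cons b ys =>
              simp only [pvLcp, List.take_succ_cons, List.length_cons]
              split_ifs with hab
              · subst hab
                constructor
                · intro h
                  have h2 := (ih xs ys).mp (by omega)
                  exact ⟨by rw [h2.1], by omega, by omega⟩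
                · rintro ⟨heq, h1, h2⟩
                  have := (ih xs ys).mpr ⟨by injection heq, by omega, by omega⟩
                  omega
              · constructor
                · omega
                · rintro ⟨heq, -, -⟩
                  exact absurd (by injection heq) hab

theorem pvP_le_left (a b : List Char) (i j : Nat) : pvP a b i j ≤ i := by
  have h := pvLcp_le_left ((a.take i).reverse) ((b.take j).reverse)
  simp only [List.length_reverse, List.length_take] at h
  unfold pvP
  omega

theorem pvP_le_right (a b : List Char) (i j : Nat) : pvP a b i j ≤ j := by
  have h := pvLcp_le_right ((a.take i).reverse) ((b.take j).reverse)
  simp only [List.length_reverse, List.length_take] at h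
  unfold pvP
  omega

theorem pvP_ge_iff (a b : List Char) (L i j : Nat) (hi : i ≤ a.length) (hj : j ≤ b.length) :
    L ≤ pvP a b i j ↔ L ≤ i ∧ L ≤ j ∧ pvSub a (i - L) L = pvSub b (j - L) L := by
  by_cases hL : L ≤ i ∧ L ≤ j
  · have hta : (a.take i).length = i := by simp; omega
    have htb : (b.take j).length = j := by simp; omega
    have ra : ((a.take i).reverse).take L = (pvSub a (i - L) L).reverse := by
      rw [List.take_reverse, hta, List.drop_take, Nat.sub_sub_self hL.1]
      rfl
    have rb : ((b.take j).reverse).take L = (pvSub b (j - L) L).reverse := by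
      rw [List.take_reverse, htb, List.drop_take, Nat.sub_sub_self hL.2]
      rfl
    unfold pvP
    rw [pvLcp_ge_iff, ra, rb]
    simp only [List.length_reverse, hta, htb]
    constructor
    · rintro ⟨h1, -, -⟩
      exact ⟨hL.1, hL.2, List.reverse_inj.mp h1⟩
    · rintro ⟨-, -, h3⟩
      exact ⟨by rw [h3], hL.1, hL.2⟩
  · constructor
    · intro h
      have h1 := pvP_le_left a b i j
      have h2 := pvP_le_right a b i j
      exact absurd ⟨by omega, by omega⟩ hL
    · rintro ⟨h1, h2, -⟩
      exact absurd ⟨h1, h2⟩ hL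

theorem pvP_succ (a b : List Char) (i j : Nat) (hi : i < a.length) (hj : j < b.length) :
    pvP a b (i + 1) (j + 1) = if a[i] = b[j] then pvP a b i j + 1 else 0 := by
  have ha : (a.take (i + 1)).reverse = a[i] :: (a.take i).reverse := by
    rw [List.take_add_one, List.getElem?_eq_getElem hi]
    simp
  have hb : (b.take (j + 1)).reverse = b[j] :: (b.take j).reverse := by
    rw [List.take_add_one, List.getElem?_eq_getElem hj]
    simp
  unfold pvP
  rw [ha, hb]
  rfl

theorem pvARow_eq (c : Char) (s2 : List Char) (prev : List Nat) (i m e : Nat) :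
    pvARow c s2 prev i m e =
      (List.zipWith (fun c2 p => if c = c2 then p + 1 else 0) s2 prev,
       pvFoldUpd (List.zipWith (fun c2 p => if c = c2 then p + 1 else 0) s2 prev) i m e) := by
  induction s2 generalizing prev m e with
  | nil => simp [pvARow, pvFoldUpd]
  | cons c2 s2 ih =>
      cases prev with
      | nil => simp [pvARow, pvFoldUpd]
      | cons p prev =>
          simp only [pvARow, List.zipWith_cons_cons, pvFoldUpd, List.foldl_cons]
          by_cases hv : (if c = c2 then p + 1 else 0) > m <;> simp [hv, ih, pvFoldUpd]

theorem pvFoldUpd_eq (vs : List Nat) (i m e : Nat) :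
    pvFoldUpd vs i m e = (vs.foldl max m, if m < vs.foldl max m then i else e) := by
  induction vs generalizing m e with
  | nil => simp [pvFoldUpd]
  | cons v vs ih =>
      simp only [pvFoldUpd, List.foldl_cons] at *
      by_cases hv : v > m
      · have hmax : max m v = v := by omega
        have hle := (PySem.List.le_foldl_max vs v).1
        have hlt : m < List.foldl max v vs := Nat.lt_of_lt_of_le hv hle
        simp [hv, ih, hmax, hlt]
      · have hmax : max m v = m := by omega
        simp [hv, ih, hmax]

theorem pvRow_cells (a b : List Char) (r : Nat) (hr : r < a.length) :
    List.zipWith (fun c2 p => if a[r] = c2 then p + 1 else 0) b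
        ((List.range (b.length + 1)).map (fun j => pvP a b r j)) =
      (List.range b.length).map (fun j => pvP a b (r + 1) (j + 1)) := by
  apply List.ext_getElem
  · simp
  · intro k h1 h2
    have hk : k < b.length := by simpa using h1
    simp only [List.getElem_zipWith, List.getElem_map, List.getElem_range]
    rw [pvP_succ a b r k hr hk]

theorem pvInv_step (a b : List Char) (r m e : Nat) (_hr : r < a.length) (hinv : pvInv a b r m e) :
    pvInv a b (r + 1)
      (((List.range b.length).map (fun j => pvP a b (r + 1) (j + 1))).foldl max m)
      (if m < ((List.range b.length).map (fun j => pvP a b (r + 1) (j + 1))).foldl max m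
        then r + 1 else e) := by
  obtain ⟨hbound, hdisj⟩ := hinv
  set cells := (List.range b.length).map (fun j => pvP a b (r + 1) (j + 1)) with hcells
  obtain ⟨hm, hub⟩ := PySem.List.le_foldl_max cells m
  constructor
  · intro i j hi hj
    by_cases hir : i ≤ r
    · exact le_trans (hbound i j hir hj) hm
    · have hieq : i = r + 1 := by omega
      subst hieq
      cases j with
      | zero => have := pvP_le_right a b (r + 1) 0; omega
      | succ j' =>
          have hj' : j' < b.length := by omega
          exact hub (pvP a b (r + 1) (j' + 1)) (by simpa [hcells] using ⟨j', hj', rfl⟩)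
  · by_cases hlt : m < cells.foldl max m
    · rw [if_pos hlt]
      right
      refine ⟨by omega, by omega, by omega, ?_, ?_⟩
      · rcases PySem.List.foldl_max_mem cells m with h | h
        · omega
        · rw [hcells] at h
          simp only [List.mem_map, List.mem_range] at h
          obtain ⟨j', hj', heq⟩ := h
          exact ⟨j' + 1, by omega, heq⟩
      · intro i j hie hj
        have := hbound i j (by omega) hj
        omega
    · rw [if_neg hlt]
      have hMeq : cells.foldl max m = m := by omega
      rw [hMeq]
      rcases hdisj with ⟨h1, h2⟩ | ⟨h1, h2, h3, h4, h5⟩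
      · exact Or.inl ⟨h1, h2⟩
      · exact Or.inr ⟨h1, h2, by omega, h4, h5⟩

theorem pvARows_char (a b : List Char) :
    ∀ (s1 : List Char) (r m e : Nat), s1 = a.drop r → r ≤ a.length → pvInv a b r m e →
      pvInv a b a.length
        (pvARows b s1 ((List.range (b.length + 1)).map (fun j => pvP a b r j)) (r + 1) m e).1
        (pvARows b s1 ((List.range (b.length + 1)).map (fun j => pvP a b r j)) (r + 1) m e).2 := by
  intro s1
  induction s1 with
  | nil =>
      intro r m e hdrop hr hinv
      have hre : r = a.length := by
        have := List.drop_eq_nil_iff.mp hdrop.symm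
        omega
      subst hre
      simpa [pvARows] using hinv
  | cons c rest ih =>
      intro r m e hdrop hr hinv
      have hrlt : r < a.length := by
        rcases Nat.lt_or_ge r a.length with h | h
        · exact h
        · rw [List.drop_eq_nil_iff.mpr h] at hdrop
          simp at hdrop
      have hsplit := List.getElem_cons_drop hrlt
      rw [← hsplit] at hdrop
      injection hdrop with hc hrest
      subst hc
      subst hrest
      simp only [pvARows]
      rw [pvARow_eq, pvRow_cells a b r hrlt, pvFoldUpd_eq]
      have hrow : (0 : Nat) :: (List.range b.length).map (fun j => pvP a b (r + 1) (j + 1)) =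
          (List.range (b.length + 1)).map (fun j => pvP a b (r + 1) j) := by
        rw [List.range_succ_eq_map, List.map_cons, List.map_map]
        congr 1
        have := pvP_le_right a b (r + 1) 0
        omega
      rw [hrow]
      exact ih (r + 1) _ _ rfl (by omega) (pvInv_step a b r m e hrlt hinv)

theorem pvBScan_eq_find (s1 : List Char) (subs : PySem.Set (List Char)) (L : Nat) (xs : List Nat) :
    pvBScan s1 subs L xs = xs.find? (fun i => PySem.Set.contains subs ((s1.drop i).take L)) := by
  induction xs with
  | nil => rfl
  | cons i rest ih =>
      cases h : PySem.Set.contains subs ((s1.drop i).take L) <;> simp at h <;>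
        simp [pvBScan, h, ih]

theorem pvBStarts_some_iff (a b : List Char) (L i : Nat) (_h1 : 1 ≤ L) (ha : L ≤ a.length)
    (_hb : L ≤ b.length) :
    pvBStarts a b L = some i ↔ pvMem a b L i ∧ ∀ i' < i, ¬ pvMem a b L i' := by
  have hp : ∀ i' : Nat,
      (PySem.Set.contains
          (PySem.Set.ofList ((List.range (b.length - L + 1)).map (fun j => (b.drop j).take L)))
          ((a.drop i').take L) = true) ↔
        ∃ j, j + L ≤ b.length ∧ pvSub a i' L = pvSub b j L := by
    intro i'
    rw [PySem.Set.contains_iff, PySem.Set.mem_ofList]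
    simp only [List.mem_map, List.mem_range]
    constructor
    · rintro ⟨j, hj, hjeq⟩
      exact ⟨j, by omega, hjeq.symm⟩
    · rintro ⟨j, hj, hjeq⟩
      exact ⟨j, by omega, hjeq.symm⟩
  unfold pvBStarts
  rw [pvBScan_eq_find]
  constructor
  · intro h
    rw [List.find?_eq_some_iff_getElem] at h
    obtain ⟨hpi, k, hk, hki, hmin⟩ := h
    simp only [List.getElem_range] at hki
    subst hki
    have hkr : k < a.length - L + 1 := by simpa using hk
    refine ⟨⟨by omega, (hp k).mp hpi⟩, ?_⟩
    intro i' hi' hmem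
    have := hmin i' (by omega)
    simp only [List.getElem_range, Bool.not_eq_eq_eq_not, Bool.not_true] at this
    have hT := (hp i').mpr hmem.2
    rw [hT] at this
    simp at this
  · rintro ⟨⟨hiL, hmem⟩, hmin⟩
    rw [List.find?_eq_some_iff_getElem]
    have hir : i < (List.range (a.length - L + 1)).length := by simp; omega
    refine ⟨(hp i).mpr hmem, i, hir, by simp, ?_⟩
    intro j hj
    simp only [List.getElem_range, Bool.not_eq_eq_eq_not, Bool.not_true]
    by_contra hcon
    have : j < (List.range (a.length - L + 1)).length := by omega
    simp only [Bool.not_eq_false] at hcon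
    have hmemj := (hp j).mp hcon
    have hjr : j < a.length - L + 1 := by simpa using this
    exact hmin j hj ⟨by omega, hmemj⟩

theorem pvBStarts_none_iff (a b : List Char) (L : Nat) (h1 : 1 ≤ L) (ha : L ≤ a.length)
    (hb : L ≤ b.length) :
    pvBStarts a b L = none ↔ ¬ pvCan a b L := by
  constructor
  · intro h ⟨i, hmem⟩
    unfold pvBStarts at h
    rw [pvBScan_eq_find, List.find?_eq_none] at h
    have hir : i ∈ List.range (a.length - L + 1) := by
      simp only [List.mem_range]
      have := hmem.1
      omega
    have hiff := (pvBStarts_some_iff a b L i h1 ha hb)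
    have hcontains : PySem.Set.contains
        (PySem.Set.ofList ((List.range (b.length - L + 1)).map (fun j => (b.drop j).take L)))
        ((a.drop i).take L) = true := by
      rw [PySem.Set.contains_iff, PySem.Set.mem_ofList]
      simp only [List.mem_map, List.mem_range]
      obtain ⟨-, j, hj, hjeq⟩ := hmem
      exact ⟨j, by omega, hjeq.symm⟩
    exact h i hir hcontains
  · intro h
    cases hs : pvBStarts a b L with
    | none => rfl
    | some i =>
        exact absurd ⟨i, ((pvBStarts_some_iff a b L i h1 ha hb).mp hs).1⟩ h

theorem pvCan_mono (a b : List Char) (L M : Nat) (h : M ≤ L) (hc : pvCan a b L) :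
    pvCan a b M := by
  obtain ⟨i, hiL, j, hjL, heq⟩ := hc
  refine ⟨i, by omega, j, by omega, ?_⟩
  have ha : pvSub a i M = (pvSub a i L).take M := by
    unfold pvSub
    rw [List.take_take, Nat.min_eq_left h]
  have hb : pvSub b j M = (pvSub b j L).take M := by
    unfold pvSub
    rw [List.take_take, Nat.min_eq_left h]
  rw [ha, hb, heq]

theorem pvBLoop_char (a b : List Char) :
    ∀ (lo best hi : Nat), lo ≤ hi → hi ≤ min a.length b.length →
      ((lo = 0 ∧ best = 0) ∨ (0 < lo ∧ pvBStarts a b lo = some best)) →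
      (∀ L, hi < L → ¬ pvCan a b L) →
      ((pvBLoop a b lo best hi).1 = 0 ∧ (pvBLoop a b lo best hi).2 = 0 ∧ ¬ pvCan a b 1) ∨
        (0 < (pvBLoop a b lo best hi).1 ∧ (pvBLoop a b lo best hi).1 ≤ min a.length b.length ∧
         pvBStarts a b (pvBLoop a b lo best hi).1 = some (pvBLoop a b lo best hi).2 ∧
         ¬ pvCan a b ((pvBLoop a b lo best hi).1 + 1)) := by
  have key : ∀ (n lo best hi : Nat), hi - lo ≤ n → lo ≤ hi → hi ≤ min a.length b.length →
      ((lo = 0 ∧ best = 0) ∨ (0 < lo ∧ pvBStarts a b lo = some best)) →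
      (∀ L, hi < L → ¬ pvCan a b L) →
      ((pvBLoop a b lo best hi).1 = 0 ∧ (pvBLoop a b lo best hi).2 = 0 ∧ ¬ pvCan a b 1) ∨
        (0 < (pvBLoop a b lo best hi).1 ∧ (pvBLoop a b lo best hi).1 ≤ min a.length b.length ∧
         pvBStarts a b (pvBLoop a b lo best hi).1 = some (pvBLoop a b lo best hi).2 ∧
         ¬ pvCan a b ((pvBLoop a b lo best hi).1 + 1)) := by
    intro n
    induction n with
    | zero =>
        intro lo best hi hn hlohi hhimin hinv hupp
        have hle : ¬ lo < hi := by omega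
        rw [pvBLoop]
        simp only [hle, dite_false]
        rcases hinv with ⟨h0, hb0⟩ | ⟨hpos, hs⟩
        · exact Or.inl ⟨h0, hb0, hupp 1 (by omega)⟩
        · exact Or.inr ⟨hpos, by omega, hs, hupp (lo + 1) (by omega)⟩
    | succ n ihn =>
        intro lo best hi hn hlohi hhimin hinv hupp
        by_cases hlt : lo < hi
        · rw [pvBLoop]
          simp only [hlt, dif_pos]
          have hmid : lo < (lo + hi + 1) / 2 ∧ (lo + hi + 1) / 2 ≤ hi := by omega
          cases hs : pvBStarts a b ((lo + hi + 1) / 2) with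
          | some i =>
              exact ihn ((lo + hi + 1) / 2) i hi (by omega) (by omega) hhimin
                (Or.inr ⟨by omega, hs⟩) hupp
          | none =>
              have hcan : ¬ pvCan a b ((lo + hi + 1) / 2) :=
                (pvBStarts_none_iff a b ((lo + hi + 1) / 2) (by omega) (by omega) (by omega)).mp hs
              refine ihn lo best ((lo + hi + 1) / 2 - 1) (by omega) (by omega) (by omega) hinv ?_
              intro L hL
              rcases Nat.lt_or_ge hi L with h' | h'
              · exact hupp L h'
              · intro hc
                exact hcan (pvCan_mono a b L ((lo + hi + 1) / 2) (by omega) hc)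
        · rw [pvBLoop]
          simp only [hlt, dite_false]
          rcases hinv with ⟨h0, hb0⟩ | ⟨hpos, hs⟩
          · exact Or.inl ⟨h0, hb0, hupp 1 (by omega)⟩
          · exact Or.inr ⟨hpos, by omega, hs, hupp (lo + 1) (by omega)⟩
  intro lo best hi hlohi hhimin hinv hupp
  exact key (hi - lo) lo best hi le_rfl hlohi hhimin hinv hupp

theorem pv_main (s1 s2 : List Char) : pvAFind s1 s2 = pvBFind s1 s2 := by
  have hcore : ∀ M E mB eB, pvInv s1 s2 s1.length M E →
      ((mB = 0 ∧ eB = 0 ∧ ¬ pvCan s1 s2 1) ∨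
       (0 < mB ∧ mB ≤ min s1.length s2.length ∧ pvBStarts s1 s2 mB = some eB ∧
        ¬ pvCan s1 s2 (mB + 1))) →
      (s1.drop (E - M)).take M = (s1.drop eB).take mB := by
    intro M E mB eB ⟨hbound, hdisj⟩ hB
    rcases hdisj with ⟨hM0, hE0⟩ | ⟨hMpos, hEpos, hEle, ⟨j0, hj0le, hPj0⟩, hstrict⟩
    · -- no common character at all
      have hnc1 : ¬ pvCan s1 s2 1 := by
        rintro ⟨i, hc⟩
        unfold pvMem at hc
        obtain ⟨hiL, j, hjL, heq⟩ := hc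
        have hge : 1 ≤ pvP s1 s2 (i + 1) (j + 1) :=
          (pvP_ge_iff s1 s2 1 (i + 1) (j + 1) (by omega) (by omega)).mpr
            ⟨by omega, by omega, by simpa using heq⟩
        have := hbound (i + 1) (j + 1) (by omega) (by omega)
        omega
      rcases hB with ⟨hm0, he0, -⟩ | ⟨hBpos, hBle, hs, -⟩
      · simp [hM0, hm0]
      · obtain ⟨hmemB, -⟩ :=
          (pvBStarts_some_iff s1 s2 mB eB (by omega) (by omega) (by omega)).mp hs
        exact absurd (pvCan_mono s1 s2 mB 1 (by omega) ⟨eB, hmemB⟩) hnc1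
    · have hMleE : M ≤ E := by
        have := pvP_le_left s1 s2 E j0
        omega
      have hMlej0 : M ≤ j0 := by
        have := pvP_le_right s1 s2 E j0
        omega
      have hsubeq : pvSub s1 (E - M) M = pvSub s2 (j0 - M) M :=
        ((pvP_ge_iff s1 s2 M E j0 hEle hj0le).mp (by omega)).2.2
      have hCanM : pvCan s1 s2 M := ⟨E - M, by unfold pvMem; exact ⟨by omega, j0 - M, by omega, hsubeq⟩⟩
      have hNotM1 : ¬ pvCan s1 s2 (M + 1) := by
        rintro ⟨i, hc⟩
        unfold pvMem at hc
        obtain ⟨hiL, j, hjL, heq⟩ := hc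
        have hge : M + 1 ≤ pvP s1 s2 (i + (M + 1)) (j + (M + 1)) :=
          (pvP_ge_iff s1 s2 (M + 1) (i + (M + 1)) (j + (M + 1)) (by omega) (by omega)).mpr
            ⟨by omega, by omega, by simpa using heq⟩
        have := hbound (i + (M + 1)) (j + (M + 1)) (by omega) (by omega)
        omega
      rcases hB with ⟨-, -, hnc1⟩ | ⟨hBpos, hBle, hs, hncB⟩
      · exact absurd (pvCan_mono s1 s2 M 1 (by omega) hCanM) hnc1
      · obtain ⟨hmemB, hminB⟩ :=
          (pvBStarts_some_iff s1 s2 mB eB (by omega) (by omega) (by omega)).mp hs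
        have hmBM : mB = M := by
          by_contra hne
          rcases Nat.lt_or_ge mB M with h' | h'
          · exact hncB (pvCan_mono s1 s2 M (mB + 1) (by omega) hCanM)
          · exact hNotM1 (pvCan_mono s1 s2 mB (M + 1) (by omega) ⟨eB, hmemB⟩)
        subst hmBM
        have heB : eB = E - mB := by
          rcases Nat.lt_trichotomy eB (E - mB) with h' | h' | h'
          · exfalso
            unfold pvMem at hmemB
            obtain ⟨hiL, j, hjL, heq⟩ := hmemB
            have hge : mB ≤ pvP s1 s2 (eB + mB) (j + mB) :=
              (pvP_ge_iff s1 s2 mB (eB + mB) (j + mB) (by omega) (by omega)).mpr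
                ⟨by omega, by omega, by simpa using heq⟩
            have hlt2 := hstrict (eB + mB) (j + mB) (by omega) (by omega)
            omega
          · exact h'
          · exact absurd (by unfold pvMem; exact ⟨by omega, j0 - mB, by omega, hsubeq⟩)
              (hminB (E - mB) h')
        rw [heB]
  have hrepl : (List.range (s2.length + 1)).map (fun j => pvP s1 s2 0 j) =
      List.replicate (s2.length + 1) 0 := by
    apply List.eq_replicate_iff.mpr
    refine ⟨by simp, ?_⟩
    intro x hx
    simp only [List.mem_map, List.mem_range] at hx
    obtain ⟨j, -, hj⟩ := hx
    have := pvP_le_left s1 s2 0 j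
    omega
  have hinv0 : pvInv s1 s2 0 0 0 := by
    constructor
    · intro i j hi hj
      have := pvP_le_left s1 s2 i j
      omega
    · exact Or.inl ⟨rfl, rfl⟩
  have hA := pvARows_char s1 s2 s1 0 0 0 (by simp) (by omega) hinv0
  rw [hrepl] at hA
  simp only [Nat.zero_add] at hA
  have hupper0 : ∀ L, min s1.length s2.length < L → ¬ pvCan s1 s2 L := by
    intro L hL hc
    obtain ⟨i, hc⟩ := hc
    unfold pvMem at hc
    obtain ⟨hiL, j, hjL, -⟩ := hc
    omega
  have hB := pvBLoop_char s1 s2 0 0 (min s1.length s2.length) (by omega) le_rfl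
    (Or.inl ⟨rfl, rfl⟩) hupper0
  simp only [pvAFind, pvBFind]
  exact hcore _ _ _ _ hA hB

-- ===== VERDICT (by name: the statement is the Claim_ definition above) =====
theorem getMaxCommonSubstring_spec : Claim_equal_getMaxCommonSubstring := by
  intro lines _
  unfold Spec_getMaxCommonSubstring getMaxCommonSubstring getMaxCommonSubstring_alt
  cases PySem.List.min? lines (fun s => PySem.Str.len s) with
  | none => rfl
  | some shortest => simp only [pv_main]
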